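-- pv_equiv track=rewrite | github.com/luisrojas8320/pizzeria-pos | backend/app/api/platforms.py | _generate_platform_recommendations
-- ===== SOURCE A (Python) =====
-- from typing import Any, List, Optional, Dict
--
-- def _generate_platform_recommendations(platform_stats: Dict) -> List[str]:
--     """Generate recommendations based on platform performance"""
--     recommendations = []
--
--     # Find best and worst performing platforms
--     if platform_stats:
--         sorted_platforms = sorted(
--             platform_stats.items(),
--             key=lambda x: x[1]["net_revenue"],
--             reverse=True
--         )
--
--         best_platform = sorted_platforms[0]
--         worst_platform = sorted_platforms[-1]
--
--         recommendations.append(f"Focus marketing efforts on {best_platform[0]} - your highest performing platform")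
--
--         if len(sorted_platforms) > 1:
--             recommendations.append(f"Consider strategies to improve performance on {worst_platform[0]}")
--
--         # Check for high commission platforms
--         high_commission_platforms = [
--             platform for platform, stats in platform_stats.items()
--             if stats["commission_percentage"] > 25
--         ]
--
--         if high_commission_platforms:
--             recommendations.append(f"High commission rates on {', '.join(high_commission_platforms)} - consider promoting direct orders")
--
--     return recommendations
-- ===== SOURCE B (Python) =====
-- from typing import Any, List, Optional, Dict
--
-- def _generate_platform_recommendations(platform_stats: Dict) -> List[str]:
--     """Generate recommendations based on platform performance (single pass, no sort)."""
--     best = None   # (name, net_revenue): first maximum, as a stable reverse sort would rank first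
--     worst = None  # (name, net_revenue): last minimum, as a stable reverse sort would rank last
--     count = 0
--     high_commission = []
--     for name, stats in platform_stats.items():
--         rev = stats["net_revenue"]
--         if best is None or rev > best[1]:
--             best = (name, rev)
--         if worst is None or rev <= worst[1]:
--             worst = (name, rev)
--         count += 1
--         if stats["commission_percentage"] > 25:
--             high_commission.append(name)
--     recommendations = []
--     if best is not None:
--         recommendations.append(f"Focus marketing efforts on {best[0]} - your highest performing platform")
--         if count > 1:
--             recommendations.append(f"Consider strategies to improve performance on {worst[0]}")
--         if high_commission:
--             recommendations.append(f"High commission rates on {', '.join(high_commission)} - consider promoting direct orders")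
--     return recommendations
-- ===== Notes on version B (the rewrite author's own statement) =====
-- stated objective: simpler
-- what changed: B replaces A's full reverse sort of the platforms by a single pass over the items that keeps the running best (first maximum) and worst (last minimum, matching the stable reverse sort's last element), the platform count and the high-commission names, so no sorted list is ever built.
import Mathlib
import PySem

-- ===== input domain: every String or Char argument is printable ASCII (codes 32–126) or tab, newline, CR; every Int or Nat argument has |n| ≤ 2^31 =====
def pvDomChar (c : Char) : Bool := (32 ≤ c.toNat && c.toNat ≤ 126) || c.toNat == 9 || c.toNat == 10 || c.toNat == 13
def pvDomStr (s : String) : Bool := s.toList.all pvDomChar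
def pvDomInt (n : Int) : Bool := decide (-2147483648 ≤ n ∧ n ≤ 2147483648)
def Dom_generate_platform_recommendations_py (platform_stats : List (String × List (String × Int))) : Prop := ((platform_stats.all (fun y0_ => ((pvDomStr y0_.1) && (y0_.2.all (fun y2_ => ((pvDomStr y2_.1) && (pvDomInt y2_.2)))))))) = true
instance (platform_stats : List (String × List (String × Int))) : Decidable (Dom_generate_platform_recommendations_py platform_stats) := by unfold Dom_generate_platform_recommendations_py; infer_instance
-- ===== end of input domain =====

-- B replaces A's sort of the platforms by a single pass keeping the running best/worst
-- (first maximum / last minimum, matching the stable reverse sort) — objective: simpler.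


-- ===== PORT A =====
-- stats[k] ; Pre_ guarantees the key is present (Python raises KeyError otherwise)
def pvStatsGet (stats : List (String × Int)) (k : String) : Int :=
  (PySem.Dict.ofList stats).getD k 0

def generate_platform_recommendations_py (platform_stats : List (String × List (String × Int))) : List String :=
  let items := (PySem.Dict.ofList platform_stats).items
  let recommendations : List String := []
  if items ≠ [] then
    let sorted_platforms := PySem.List.sorted items (fun x => pvStatsGet x.2 "net_revenue") true
    let best_platform := sorted_platforms.headD ("", [])
    let worst_platform := sorted_platforms.getLastD ("", [])
    let recommendations := recommendations ++ ["Focus marketing efforts on " ++ best_platform.1 ++ " - your highest performing platform"]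
    let recommendations := if sorted_platforms.length > 1 then recommendations ++ ["Consider strategies to improve performance on " ++ worst_platform.1] else recommendations
    let high_commission_platforms := (items.filter (fun p => pvStatsGet p.2 "commission_percentage" > 25)).map (fun p => p.1)
    if high_commission_platforms ≠ [] then recommendations ++ ["High commission rates on " ++ PySem.Str.join ", " high_commission_platforms ++ " - consider promoting direct orders"] else recommendations
  else recommendations

-- ===== PORT B =====
-- one step of Source B's single loop: (best, worst, count, high_commission)
def pvStepB (s : Option (String × Int) × Option (String × Int) × Int × List String)
    (p : String × List (String × Int)) :
    Option (String × Int) × Option (String × Int) × Int × List String :=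
  let rev := pvStatsGet p.2 "net_revenue"
  let best := match s.1 with
    | none => some (p.1, rev)
    | some b => if rev > b.2 then some (p.1, rev) else some b
  let worst := match s.2.1 with
    | none => some (p.1, rev)
    | some w => if rev ≤ w.2 then some (p.1, rev) else some w
  let count := s.2.2.1 + 1
  let high := if pvStatsGet p.2 "commission_percentage" > 25 then s.2.2.2 ++ [p.1] else s.2.2.2
  (best, worst, count, high)

def generate_platform_recommendations_py_alt (platform_stats : List (String × List (String × Int))) : List String :=
  let items := (PySem.Dict.ofList platform_stats).items
  let st := items.foldl pvStepB (none, none, 0, [])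
  match st.1 with
  | none => []
  | some best =>
    let recommendations := ["Focus marketing efforts on " ++ best.1 ++ " - your highest performing platform"]
    -- worst[0]: worst is always set when best is, so the getD default is never used
    let recommendations := if st.2.2.1 > 1 then recommendations ++ ["Consider strategies to improve performance on " ++ (st.2.1.getD ("", 0)).1] else recommendations
    if st.2.2.2 ≠ [] then recommendations ++ ["High commission rates on " ++ PySem.Str.join ", " st.2.2.2 ++ " - consider promoting direct orders"] else recommendations

-- ===== PRECONDITION & SPEC =====
-- Pre_: every platform's stats dict carries the keys "net_revenue" and "commission_percentage";
-- on any other input Python A raises KeyError.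
def Pre_generate_platform_recommendations_py (platform_stats : List (String × List (String × Int))) : Prop :=
  (platform_stats.all (fun p => p.2.any (fun q => q.1 == "net_revenue") && p.2.any (fun q => q.1 == "commission_percentage"))) = true
instance (platform_stats : List (String × List (String × Int))) : Decidable (Pre_generate_platform_recommendations_py platform_stats) := by unfold Pre_generate_platform_recommendations_py; infer_instance

def pvWitness_generate_platform_recommendations_py : (List (String × List (String × Int))) :=
  [("uber_eats", [("net_revenue", 100), ("commission_percentage", 30)]),
   ("direct", [("net_revenue", 80), ("commission_percentage", 0)])]

def Spec_generate_platform_recommendations_py (platform_stats : List (String × List (String × Int))) (out : List String) : Prop := out = generate_platform_recommendations_py_alt platform_stats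
instance (platform_stats : List (String × List (String × Int))) (out : List String) : Decidable (Spec_generate_platform_recommendations_py platform_stats out) := by unfold Spec_generate_platform_recommendations_py; infer_instance

-- ===== CLAIM (what is proved, stated in full; the proofs are below) =====
def Claim_equal_generate_platform_recommendations_py : Prop := ∀ (platform_stats : List (String × List (String × Int))), Dom_generate_platform_recommendations_py platform_stats → Pre_generate_platform_recommendations_py platform_stats → Spec_generate_platform_recommendations_py platform_stats (generate_platform_recommendations_py platform_stats)

-- ===== LEMMAS AND PROOFS =====

-- running "first maximum" / "last minimum" on whole elements
def pvFirstMax {α : Type} (key : α → Int) (b : Option α) (x : α) : Option α :=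
  match b with
  | none => some x
  | some m => if key m < key x then some x else some m

def pvLastMin {α : Type} (key : α → Int) (b : Option α) (x : α) : Option α :=
  match b with
  | none => some x
  | some m => if key x ≤ key m then some x else some m

theorem pvHead_insertBy {α : Type} (key : α → Int) (x : α) (acc : List α) :
    (PySem.List.insertBy (fun a b => decide (key b < key a)) x acc).head? = pvFirstMax key acc.head? x := by
  cases acc with
  | nil => rfl
  | cons y ys =>
    simp only [PySem.List.insertBy, pvFirstMax, List.head?]
    by_cases h : key y < key x <;> simp [h]

theorem pvInsertBy_ne_nil {α : Type} (bef : α → α → Bool) (x : α) (acc : List α) :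
    PySem.List.insertBy bef x acc ≠ [] := by
  cases acc with
  | nil => simp [PySem.List.insertBy]
  | cons y ys => simp only [PySem.List.insertBy]; split <;> simp

theorem pvGetLast_insertBy {α : Type} (key : α → Int) (x : α) (acc : List α) :
    (PySem.List.insertBy (fun a b => decide (key b < key a)) x acc).getLast? =
      if acc.all (fun y => !decide (key y < key x)) then some x else acc.getLast? := by
  induction acc with
  | nil => rfl
  | cons y ys ih =>
    simp only [PySem.List.insertBy, List.all_cons]
    by_cases h : key y < key x
    · simp [h, List.getLast?_cons_cons]
    · have hne := pvInsertBy_ne_nil (fun a b => decide (key b < key a)) x ys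
      rw [if_neg (by simp [h])]
      rcases hx : PySem.List.insertBy (fun a b => decide (key b < key a)) x ys with _ | ⟨z, zs⟩
      · exact absurd hx hne
      · rw [List.getLast?_cons_cons, ← hx, ih]
        simp only [h, decide_false, Bool.not_false, Bool.true_and]
        by_cases hall : ys.all (fun y => !decide (key y < key x))
        · simp [hall]
        · have hys : ys ≠ [] := by rintro rfl; simp at hall
          rcases ys with _ | ⟨u, us⟩
          · exact absurd rfl hys
          · simp [hall, List.getLast?_cons_cons]

theorem pvSortedRev_head {α : Type} (key : α → Int) (xs : List α) :
    (PySem.List.sorted xs key true).head? = xs.foldl (pvFirstMax key) none := by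
  rw [PySem.List.sorted_rev_eq_foldl_insertBy]
  have aux : ∀ (l : List α) (acc : List α),
      (l.foldl (fun acc x => PySem.List.insertBy (fun a b => decide (key b < key a)) x acc) acc).head? =
      l.foldl (pvFirstMax key) acc.head? := by
    intro l
    induction l with
    | nil => intro acc; rfl
    | cons x t ih =>
      intro acc
      simp only [List.foldl_cons]
      rw [ih, pvHead_insertBy]
  simpa using aux xs []

theorem pvGetLastAux {α : Type} (key : α → Int) :
    ∀ (xs acc : List α) (mo : Option α),
      acc.getLast? = mo → (∀ m, mo = some m → ∀ y ∈ acc, key m ≤ key y) →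
      (xs.foldl (fun acc x => PySem.List.insertBy (fun a b => decide (key b < key a)) x acc) acc).getLast? =
        xs.foldl (pvLastMin key) mo := by
  intro xs
  induction xs with
  | nil => intro acc mo h1 _; simpa using h1
  | cons x t ih =>
    intro acc mo h1 h2
    simp only [List.foldl_cons]
    apply ih
    · rw [pvGetLast_insertBy]
      cases mo with
      | none =>
        have : acc = [] := List.getLast?_eq_none_iff.mp h1
        subst this
        simp [pvLastMin]
      | some m =>
        have hmem : m ∈ acc := List.mem_of_getLast? h1
        have hmin := h2 m rfl
        by_cases hc : key x ≤ key m
        · rw [if_pos]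
          · simp [pvLastMin, hc]
          · simp only [List.all_eq_true]
            intro y hy
            have := hmin y hy
            simp only [Bool.not_eq_eq_eq_not, Bool.not_true, decide_eq_false_iff_not, not_lt]
            omega
        · rw [if_neg, h1]
          · simp [pvLastMin, hc]
          · simp only [List.all_eq_true, not_forall]
            exact ⟨m, hmem, by simp only [Bool.not_eq_eq_eq_not, Bool.not_true,
              decide_eq_false_iff_not, not_lt, not_le]; omega⟩
    · intro m' hm' y hy
      have hy' : y = x ∨ y ∈ acc := (PySem.List.mem_insertBy _ _ _ _).mp hy
      have hm'' : (mo = none ∧ m' = x) ∨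
          (∃ m, mo = some m ∧ ((key x ≤ key m ∧ m' = x) ∨ (¬ key x ≤ key m ∧ m' = m))) := by
        cases mo with
        | none => simp only [pvLastMin] at hm'; exact Or.inl ⟨rfl, (Option.some_inj.mp hm').symm⟩
        | some m =>
          refine Or.inr ⟨m, rfl, ?_⟩
          simp only [pvLastMin] at hm'
          by_cases hc : key x ≤ key m
          · simp [hc] at hm'; exact Or.inl ⟨hc, hm'.symm⟩
          · simp [hc] at hm'; exact Or.inr ⟨hc, hm'.symm⟩
      rcases hm'' with ⟨hmo, rfl⟩ | ⟨m, hmo, ⟨hc, rfl⟩ | ⟨hc, rfl⟩⟩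
      · subst hmo
        have : acc = [] := List.getLast?_eq_none_iff.mp h1
        rcases hy' with rfl | hy'
        · exact le_refl _
        · simp_all
      · subst hmo
        rcases hy' with rfl | hy'
        · exact le_refl _
        · exact le_trans hc (h2 m rfl y hy')
      · subst hmo
        rcases hy' with rfl | hy'
        · omega
        · exact h2 _ rfl y hy'

theorem pvSortedRev_getLast {α : Type} (key : α → Int) (xs : List α) :
    (PySem.List.sorted xs key true).getLast? = xs.foldl (pvLastMin key) none := by
  rw [PySem.List.sorted_rev_eq_foldl_insertBy]
  exact pvGetLastAux key xs [] none rfl (by simp)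

theorem pvFirstMax_some {α : Type} (key : α → Int) :
    ∀ (t : List α) (a : α), ∃ m, t.foldl (pvFirstMax key) (some a) = some m := by
  intro t
  induction t with
  | nil => intro a; exact ⟨a, rfl⟩
  | cons x t ih =>
    intro a
    simp only [List.foldl_cons, pvFirstMax]
    by_cases hc : key a < key x
    · simpa [hc] using ih x
    · simpa [hc] using ih a

theorem pvLastMin_some {α : Type} (key : α → Int) :
    ∀ (t : List α) (a : α), ∃ m, t.foldl (pvLastMin key) (some a) = some m := by
  intro t
  induction t with
  | nil => intro a; exact ⟨a, rfl⟩
  | cons x t ih =>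
    intro a
    simp only [List.foldl_cons, pvLastMin]
    by_cases hc : key x ≤ key a
    · simpa [hc] using ih x
    · simpa [hc] using ih a

-- decomposition of Source B's single loop into its four independent accumulators
theorem pvFoldB_eq (xs : List (String × List (String × Int)))
    (b w : Option (String × List (String × Int))) (c : Int) (h : List String) :
    xs.foldl pvStepB (b.map (fun m => (m.1, pvStatsGet m.2 "net_revenue")),
                      w.map (fun m => (m.1, pvStatsGet m.2 "net_revenue")), c, h) =
      ((xs.foldl (pvFirstMax (fun p => pvStatsGet p.2 "net_revenue")) b).map (fun m => (m.1, pvStatsGet m.2 "net_revenue")),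
       (xs.foldl (pvLastMin (fun p => pvStatsGet p.2 "net_revenue")) w).map (fun m => (m.1, pvStatsGet m.2 "net_revenue")),
       c + xs.length,
       h ++ (xs.filter (fun p => pvStatsGet p.2 "commission_percentage" > 25)).map (fun p => p.1)) := by
  induction xs generalizing b w c h with
  | nil => simp
  | cons x t ih =>
    simp only [List.foldl_cons]
    have hstep : pvStepB
        (b.map (fun m => (m.1, pvStatsGet m.2 "net_revenue")),
         w.map (fun m => (m.1, pvStatsGet m.2 "net_revenue")), c, h) x =
        ((pvFirstMax (fun p => pvStatsGet p.2 "net_revenue") b x).map (fun m => (m.1, pvStatsGet m.2 "net_revenue")),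
         (pvLastMin (fun p => pvStatsGet p.2 "net_revenue") w x).map (fun m => (m.1, pvStatsGet m.2 "net_revenue")),
         c + 1,
         if pvStatsGet x.2 "commission_percentage" > 25 then h ++ [x.1] else h) := by
      cases b <;> cases w <;>
        simp only [pvStepB, pvFirstMax, pvLastMin, Option.map_none, Option.map_some, gt_iff_lt] <;>
        split_ifs <;> simp_all
    rw [hstep, ih]
    refine congrArg₂ _ rfl (congrArg₂ _ rfl ?_)
    refine congrArg₂ _ ?_ ?_
    · simp only [List.length_cons]; push_cast; ring
    · rw [List.filter_cons]
      by_cases hc : pvStatsGet x.2 "commission_percentage" > 25 <;> simp [hc]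

-- ===== VERDICT (by name: the statement is the Claim_ definition above) =====
theorem generate_platform_recommendations_py_spec : Claim_equal_generate_platform_recommendations_py := by
  intro ps _ _
  unfold Spec_generate_platform_recommendations_py
  unfold generate_platform_recommendations_py generate_platform_recommendations_py_alt
  generalize (PySem.Dict.ofList ps).items = L
  dsimp only
  rcases L with _ | ⟨x, t⟩
  · simp
  · obtain ⟨m, hm⟩ := pvFirstMax_some (fun p : String × List (String × Int) => pvStatsGet p.2 "net_revenue") t x
    obtain ⟨wm, hwm⟩ := pvLastMin_some (fun p : String × List (String × Int) => pvStatsGet p.2 "net_revenue") t x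
    have hmfold : (x :: t).foldl (pvFirstMax (fun p => pvStatsGet p.2 "net_revenue")) none = some m := by
      simpa [pvFirstMax] using hm
    have hwfold : (x :: t).foldl (pvLastMin (fun p => pvStatsGet p.2 "net_revenue")) none = some wm := by
      simpa [pvLastMin] using hwm
    have hfold := pvFoldB_eq (x :: t) none none 0 []
    simp only [Option.map_none, List.nil_append] at hfold
    rw [hfold, hmfold, hwfold]
    simp only [Option.map_some]
    have hhead := pvSortedRev_head (fun p : String × List (String × Int) => pvStatsGet p.2 "net_revenue") (x :: t)
    rw [hmfold] at hhead
    have hlast := pvSortedRev_getLast (fun p : String × List (String × Int) => pvStatsGet p.2 "net_revenue") (x :: t)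
    rw [hwfold] at hlast
    have hbd : (PySem.List.sorted (x :: t) (fun p : String × List (String × Int) => pvStatsGet p.2 "net_revenue") true).headD ("", []) = m := by
      rw [List.headD_eq_head?_getD, hhead]; rfl
    have hld : (PySem.List.sorted (x :: t) (fun p : String × List (String × Int) => pvStatsGet p.2 "net_revenue") true).getLastD ("", []) = wm := by
      rw [List.getLastD_eq_getLast?, hlast]; rfl
    have hlen : (PySem.List.sorted (x :: t) (fun p : String × List (String × Int) => pvStatsGet p.2 "net_revenue") true).length = (x :: t).length :=
      PySem.List.length_sorted _ _ _
    simp only [ne_eq, reduceCtorEq, not_false_eq_true, if_true, hbd, hld, hlen, Option.getD_some]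
    have hcond : ((x :: t).length > 1) ↔ ((0 : Int) + ((x :: t).length : Int) > 1) := by
      omega
    rcases em ((x :: t).length > 1) with hgt | hgt
    · rw [if_pos hgt, if_pos (hcond.mp hgt)]
      simp
    · rw [if_neg hgt, if_neg (fun hx => hgt (hcond.mpr hx))]
      simp
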